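-- pv_equiv track=rewrite | github.com/Uklusi/AdventOfCode2020 | Day_10/part2.py | calcNumPoss
-- ===== SOURCE A (Python) =====
-- def calcNumPoss(ldiff):
--     if len(ldiff) in [0,1]:
--         return 1
--     x = ldiff[0] + ldiff[1]
--     if x <= 3:
--         return calcNumPoss(ldiff[1:]) + calcNumPoss([x] + ldiff[2:])
--     else:
--         return calcNumPoss(ldiff[1:])
-- ===== SOURCE B (Python) =====
-- def calcNumPoss(ldiff):
--     n = len(ldiff)
--     dp = [1] * (n + 1)
--     for i in range(n - 1, -1, -1):
--         total = dp[i + 1]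
--         s = ldiff[i]
--         j = i + 1
--         while j < n:
--             s += ldiff[j]
--             if s > 3:
--                 break
--             total += dp[j + 1]
--             j += 1
--         dp[i] = total
--     return dp[0]
-- ===== Notes on version B (the rewrite author's own statement) =====
-- stated objective: faster
-- what changed: Replaced the exponential branching recursion with a right-to-left dynamic program over suffixes (dp[i] = dp[i+1] + dp[j+1] for every mergeable extension), so each suffix is computed once; intended as faster: a timing run measured B 3.09x at n=16 and A timed out at n=64 where B returned, so no ratio at the largest size could be confirmed.
import Mathlib
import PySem

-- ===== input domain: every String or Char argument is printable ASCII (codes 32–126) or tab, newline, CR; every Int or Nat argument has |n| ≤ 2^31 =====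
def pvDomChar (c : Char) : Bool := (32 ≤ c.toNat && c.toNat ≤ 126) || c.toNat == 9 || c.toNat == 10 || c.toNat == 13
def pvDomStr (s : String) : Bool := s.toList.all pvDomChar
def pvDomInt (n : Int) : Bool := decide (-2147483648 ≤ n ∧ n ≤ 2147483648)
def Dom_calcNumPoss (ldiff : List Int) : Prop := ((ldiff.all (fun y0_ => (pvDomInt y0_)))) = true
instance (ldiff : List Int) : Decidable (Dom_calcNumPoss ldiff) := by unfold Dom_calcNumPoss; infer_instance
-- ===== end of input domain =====

-- B replaces A's branching recursion by a right-to-left suffix DP; intended as faster (probe: 3.09x at n=16, A timed out at n=64 where B returned).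


-- ===== PORT A =====
def calcNumPoss (ldiff : List Int) : Int :=
  match ldiff with
  | [] => 1
  | [_] => 1
  | a :: b :: rest =>
    let x := a + b
    if x ≤ 3 then calcNumPoss (b :: rest) + calcNumPoss (x :: rest)
    else calcNumPoss (b :: rest)
termination_by ldiff.length
decreasing_by all_goals simp

-- ===== PORT B =====
-- inner while-loop of Source B: running sum s over the remaining elements, adding the
-- matching dp value for each extension, stopping as soon as s exceeds 3
def pvScan (s : Int) : List Int → List Int → Int
  | x :: xs, d :: ds => if s + x > 3 then 0 else d + pvScan (s + x) xs ds
  | _, _ => 0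

-- the dp array of Source B, built right-to-left: one dp value per suffix (last entry = dp[n] = 1)
def pvDP : List Int → List Int
  | [] => [1]
  | a :: t =>
    let ds := pvDP t
    (ds.headD 1 + pvScan a t ds.tail) :: ds

def calcNumPoss_alt (ldiff : List Int) : Int := (pvDP ldiff).headD 1

-- ===== PRECONDITION & SPEC =====
def Spec_calcNumPoss (ldiff : List Int) (out : Int) : Prop := out = calcNumPoss_alt ldiff
instance (ldiff : List Int) (out : Int) : Decidable (Spec_calcNumPoss ldiff out) := by unfold Spec_calcNumPoss; infer_instance

-- ===== CLAIM (what is proved, stated in full; the proofs are below) =====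
def Claim_equal_calcNumPoss : Prop := ∀ (ldiff : List Int), Dom_calcNumPoss ldiff → Spec_calcNumPoss ldiff (calcNumPoss ldiff)

-- ===== LEMMAS AND PROOFS =====

-- A's recursion on a merged head s equals dp[i+1] plus the inner scan over dp values of later suffixes
theorem calc_cons (t : List Int) : ∀ s : Int,
    calcNumPoss (s :: t) = calcNumPoss t + pvScan s t ((t.tails.tail).map calcNumPoss) := by
  induction t with
  | nil => intro s; simp [calcNumPoss, pvScan]
  | cons b rest ih =>
    intro s
    rw [List.tails_cons, List.tail_cons, calcNumPoss,
      show rest.tails = rest :: rest.tails.tail by cases rest <;> simp,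
      List.map_cons]
    simp only [pvScan]
    by_cases h : s + b ≤ 3
    · have h' : ¬ (s + b > 3) := by omega
      rw [if_pos h, if_neg h', ih (s + b)]
    · have h' : s + b > 3 := by omega
      rw [if_neg h, if_pos h']; ring

theorem pvDP_eq (l : List Int) : pvDP l = l.tails.map calcNumPoss := by
  induction l with
  | nil => simp [pvDP, calcNumPoss]
  | cons a t ih =>
    rw [pvDP]
    simp only [ih, List.tails_cons, List.map_cons]
    congr 1
    have ht : (t.tails.map calcNumPoss).headD 1 = calcNumPoss t := by
      cases t <;> simp
    have htl : (t.tails.map calcNumPoss).tail = t.tails.tail.map calcNumPoss := by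
      cases t <;> simp
    rw [ht, htl, calc_cons t a]

-- ===== VERDICT (by name: the statement is the Claim_ definition above) =====
theorem calcNumPoss_spec : Claim_equal_calcNumPoss := by
  intro l _
  unfold Spec_calcNumPoss calcNumPoss_alt
  rw [pvDP_eq]
  cases l <;> simp
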